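-- pv_equiv track=rewrite | github.com/vnpedroso/cryptography | caesar_cipher/caesar_cipher/caesar_cipher.py | generate_key
-- ===== SOURCE A (Python) =====
-- def generate_key(n: int) -> dict:
--     #mapping all letters
--     letters = "ABCDEFGHIJKLMNOPQRSTUVWXYZ" # let's keep it upper case
--     key = {} # let's benefit from the 1:1 relationship of key-valued pairs...
--     counter = 0 # this counter will be important later on!
--
--     for char in letters:
--         key[char] = letters[(counter + n) % len(letters)]
--         # by adding module of len(letters) we assure that the counter always stays between the letters!
--         # if the number is smaller than 26, it returns itself
--         # if the number is bigger, we get the closet 26 multiple plus the difference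
--         # and yes, that difference is always a number between 0 and 26
--         counter += 1
--
--     return key
-- ===== SOURCE B (Python) =====
-- def generate_key(n: int) -> dict:
--     letters = "ABCDEFGHIJKLMNOPQRSTUVWXYZ"
--     k = n % len(letters)
--     rotated = letters[k:] + letters[:k]
--     return dict(zip(letters, rotated))
-- ===== Notes on version B (the rewrite author's own statement) =====
-- stated objective: idiomatic
-- what changed: Replaces the per-character modular index loop with one effective shift k reduced modulo the alphabet length, a slice rotation letters[k:] + letters[:k], and a positional dict(zip(...)).
import Mathlib
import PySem

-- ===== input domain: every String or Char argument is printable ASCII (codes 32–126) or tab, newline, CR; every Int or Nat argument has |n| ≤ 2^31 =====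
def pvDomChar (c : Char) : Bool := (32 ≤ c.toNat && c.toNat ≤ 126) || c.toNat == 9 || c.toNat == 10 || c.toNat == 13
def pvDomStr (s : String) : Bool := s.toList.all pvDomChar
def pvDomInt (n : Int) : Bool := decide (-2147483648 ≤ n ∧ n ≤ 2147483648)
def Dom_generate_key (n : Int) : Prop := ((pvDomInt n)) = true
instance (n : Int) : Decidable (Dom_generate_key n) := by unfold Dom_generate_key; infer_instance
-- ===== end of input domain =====

-- B replaces A's per-character modular index loop by one shift k = n % 26, a slice rotation and a positional zip (idiomatic; same cost).

-- the alphabet "ABCDEFGHIJKLMNOPQRSTUVWXYZ" as its character list (how Python iterates it)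
def pvLetters : List Char :=
  ['A','B','C','D','E','F','G','H','I','J','K','L','M',
   'N','O','P','Q','R','S','T','U','V','W','X','Y','Z']

-- ===== PORT A =====
-- loop 'for char in letters' with dict insertion and a counter; the index (counter+n) % 26
-- is always in range (the divisor 26 is positive), so pyGetD with an arbitrary default is exact.
def generate_key (n : Int) : List (String × String) :=
  ((pvLetters.foldl
    (fun (st : PySem.Dict String String × Int) c =>
      (st.1.insert (String.ofList [c])
        (String.ofList [PySem.List.pyGetD pvLetters (PySem.Int.mod (st.2 + n) (pvLetters.length : Int)) 'A']),
       st.2 + 1))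
    ((PySem.Dict.empty : PySem.Dict String String), 0)).1).items

-- ===== PORT B =====
def generate_key_alt (n : Int) : List (String × String) :=
  let k := PySem.Int.mod n (pvLetters.length : Int)
  let rotated := PySem.List.slice pvLetters (some k) none ++ PySem.List.slice pvLetters none (some k)
  (pvLetters.zip rotated).map (fun p => (String.ofList [p.1], String.ofList [p.2]))

-- ===== PRECONDITION & SPEC =====
def Spec_generate_key (n : Int) (out : List (String × String)) : Prop := out = generate_key_alt n
instance (n : Int) (out : List (String × String)) : Decidable (Spec_generate_key n out) := by unfold Spec_generate_key; infer_instance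

-- ===== CLAIM (what is proved, stated in full; the proofs are below) =====
def Claim_equal_generate_key : Prop := ∀ (n : Int), Dom_generate_key n → Spec_generate_key n (generate_key n)

-- ===== LEMMAS AND PROOFS =====

theorem pv_mod26 (a : Int) : PySem.Int.mod a 26 = a % 26 :=
  PySem.Int.mod_eq_emod_of_pos (by norm_num)

theorem pv_len26 : ((pvLetters.length : Nat) : Int) = 26 := by decide

theorem gk_A_mod (n : Int) : generate_key n = generate_key (PySem.Int.mod n 26) := by
  have hmod : ∀ c : Int, PySem.Int.mod (c + n) 26 = PySem.Int.mod (c + PySem.Int.mod n 26) 26 := by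
    intro c; simp only [pv_mod26]; omega
  simp only [generate_key, pv_len26, hmod]

theorem gk_B_mod (n : Int) : generate_key_alt n = generate_key_alt (PySem.Int.mod n 26) := by
  have h : PySem.Int.mod (PySem.Int.mod n 26) 26 = PySem.Int.mod n 26 := by
    simp only [pv_mod26]; omega
  simp only [generate_key_alt, pv_len26, h]

theorem gk_residue (r : Int) (h0 : 0 ≤ r) (h1 : r < 26) :
    generate_key r = generate_key_alt r := by
  interval_cases r <;> decide

-- ===== VERDICT (by name: the statement is the Claim_ definition above) =====
theorem generate_key_spec : Claim_equal_generate_key := by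
  intro n _
  unfold Spec_generate_key
  rw [gk_A_mod, gk_B_mod]
  refine gk_residue _ ?_ ?_ <;> simp only [pv_mod26] <;> omega
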